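-- pv_equiv track=rewrite | github.com/pypi-data/pypi-mirror-398 | packages/hanzo-mcp/hanzo_mcp-0.9.12.tar.gz/hanzo_mcp-0.9.12/hanzo_mcp/tools/filesystem/git_search.py | _format_grep_results
-- ===== SOURCE A (Python) =====
-- def _format_grep_results(lines: list[str], pattern: str) -> str:
--     """Format git grep results nicely."""
--     output = []
--     current_ref = None
--
--     for line in lines:
--         if ":" in line:
--             parts = line.split(":", 3)
--             if len(parts) >= 3:
--                 ref = parts[0]
--                 file_path = parts[1]
--                 line_num = parts[2]
--                 content = parts[3] if len(parts) > 3 else ""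
--
--                 if ref != current_ref:
--                     current_ref = ref
--                     output.append(f"\n=== {ref} ===")
--
--                 output.append(f"{file_path}:{line_num}: {content}")
--
--     return f"Found matches for '{pattern}':\n" + "\n".join(output)
-- ===== SOURCE B (Python) =====
-- def _format_grep_results(lines: list[str], pattern: str) -> str:
--     """Format git grep results: parse every line first, then emit consecutive ref-groups."""
--     records = []
--     for line in lines:
--         parts = line.split(":", 3)
--         if len(parts) >= 3:
--             records.append((parts[0], parts[1], parts[2], parts[3] if len(parts) > 3 else ""))
--     output = []
--     i = 0
--     n = len(records)
--     while i < n: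
--         ref = records[i][0]
--         j = i
--         while j < n and records[j][0] == ref:
--             j += 1
--         output.append(f"\n=== {ref} ===")
--         for _, fp, ln, content in records[i:j]:
--             output.append(f"{fp}:{ln}: {content}")
--         i = j
--     return f"Found matches for '{pattern}':\n" + "\n".join(output)
-- ===== Notes on version B (the rewrite author's own statement) =====
-- stated objective: alternative
-- what changed: B replaces A's single pass with trailing current_ref state by a two-phase pipeline: first parse all lines into (ref,file,line,content) records, then emit consecutive same-ref runs as groups (header once per run).
import Mathlib
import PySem

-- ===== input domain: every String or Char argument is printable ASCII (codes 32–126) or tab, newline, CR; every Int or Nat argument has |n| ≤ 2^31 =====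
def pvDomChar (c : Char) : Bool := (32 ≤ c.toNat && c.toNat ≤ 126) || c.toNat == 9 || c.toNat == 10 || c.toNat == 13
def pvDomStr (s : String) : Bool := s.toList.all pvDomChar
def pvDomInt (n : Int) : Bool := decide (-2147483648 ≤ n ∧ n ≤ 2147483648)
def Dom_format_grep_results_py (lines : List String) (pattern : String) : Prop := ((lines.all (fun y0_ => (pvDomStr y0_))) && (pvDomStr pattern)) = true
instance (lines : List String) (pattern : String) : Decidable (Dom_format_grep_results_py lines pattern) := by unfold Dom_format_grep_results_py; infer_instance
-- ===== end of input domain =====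

-- B restructures A's single stateful pass as parse-all-lines then group-consecutive-refs; same output, same cost (objective: alternative).

-- ===== PORT A =====
-- A's loop body: state is (output, current_ref); skip lines without ':' or with < 3 split parts.
def pvStepA (st : List String × Option String) (line : String) : List String × Option String :=
  if PySem.Str.isIn ":" line then
    match (PySem.Str.splitMax? line ":" 3).getD [] with
    | p0 :: p1 :: p2 :: rest =>
      let content := rest.headD ""
      let st1 := if some p0 ≠ st.2 then (st.1 ++ ["\n=== " ++ p0 ++ " ==="], some p0) else st
      (st1.1 ++ [p1 ++ ":" ++ p2 ++ ": " ++ content], st1.2)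
    | _ => st
  else st

def format_grep_results_py (lines : List String) (pattern : String) : String :=
  let st := lines.foldl pvStepA ([], none)
  "Found matches for '" ++ pattern ++ "':\n" ++ PySem.Str.join "\n" st.1

-- ===== PORT B =====
-- B phase 1: parse a line into a record, none if it has fewer than 3 split parts.
def pvParse (line : String) : Option (String × String × String × String) :=
  match (PySem.Str.splitMax? line ":" 3).getD [] with
  | p0 :: p1 :: p2 :: rest => some (p0, p1, p2, rest.headD "")
  | _ => none

def pvFmt (r : String × String × String × String) : String :=
  r.2.1 ++ ":" ++ r.2.2.1 ++ ": " ++ r.2.2.2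

-- B phase 2: emit one header per consecutive run of equal refs, then the run's formatted records.
def pvGroups (recs : List (String × String × String × String)) : List String :=
  match recs with
  | [] => []
  | r :: rs =>
    (("\n=== " ++ r.1 ++ " ===") :: (r :: rs.takeWhile (fun x => x.1 == r.1)).map pvFmt)
      ++ pvGroups (rs.dropWhile (fun x => x.1 == r.1))
termination_by recs.length
decreasing_by
  exact Nat.lt_succ_of_le (List.length_dropWhile_le _ _)

def format_grep_results_py_alt (lines : List String) (pattern : String) : String :=
  "Found matches for '" ++ pattern ++ "':\n" ++ PySem.Str.join "\n" (pvGroups (lines.filterMap pvParse))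

-- ===== PRECONDITION & SPEC =====
def Spec_format_grep_results_py (lines : List String) (pattern : String) (out : String) : Prop := out = format_grep_results_py_alt lines pattern
instance (lines : List String) (pattern : String) (out : String) : Decidable (Spec_format_grep_results_py lines pattern out) := by unfold Spec_format_grep_results_py; infer_instance

-- ===== CLAIM (what is proved, stated in full; the proofs are below) =====
def Claim_equal_format_grep_results_py : Prop := ∀ (lines : List String) (pattern : String), Dom_format_grep_results_py lines pattern → Spec_format_grep_results_py lines pattern (format_grep_results_py lines pattern)

-- ===== LEMMAS AND PROOFS =====

-- A's behaviour rewritten as structural recursion over the parsed records, threading the previous ref.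
def renderA (cur : Option String) : List (String × String × String × String) → List String
  | [] => []
  | r :: rs =>
    (if some r.1 ≠ cur then ["\n=== " ++ r.1 ++ " ==="] else []) ++ pvFmt r :: renderA (some r.1) rs

-- a line with no ':' splits into the single piece [line]
theorem splitGo_no_sep (fuel : Nat) : ∀ (m : Nat) (l cur : List Char) (acc : List (List Char)),
    ¬ [':'] <:+: l →
    PySem.Chars.splitOnMax.go [':'] fuel m l cur acc = ((cur.reverse ++ l) :: acc).reverse := by
  induction fuel with
  | zero => intro m l cur acc h; simp [PySem.Chars.splitOnMax.go]
  | succ fuel ih =>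
    intro m l cur acc h
    cases l with
    | nil => simp [PySem.Chars.splitOnMax.go]
    | cons c rest =>
      have hpre : List.isPrefixOf [':'] (c :: rest) = false := by
        by_contra hc
        simp only [Bool.not_eq_false, List.isPrefixOf_iff_prefix] at hc
        exact h hc.isInfix
      rw [PySem.Chars.splitOnMax.go]
      split
      · rfl
      · rw [hpre]
        rw [if_neg (by simp)]
        rw [ih]
        · simp
        · intro hc
          exact h (hc.trans (List.suffix_cons c rest).isInfix)

theorem parse_none_of_no_colon (line : String) (h : PySem.Str.isIn ":" line = false) :
    (PySem.Str.splitMax? line ":" 3).getD [] = [line] := by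
  have h' : ¬ [':'] <:+: line.toList := by
    rw [PySem.Str.isIn_eq] at h
    exact (PySem.Chars.isIn_eq_false_iff _ _).mp h
  rw [PySem.Str.splitMax?]
  rw [PySem.Chars.splitMax?]
  rw [if_neg (by decide)]
  show (Option.map _ (some _)).getD [] = _
  simp only [Option.map_some, Option.getD_some]
  rw [PySem.Chars.splitOnMax]
  rw [if_neg (by decide)]
  rw [show (":".toList) = [':'] from rfl, splitGo_no_sep _ _ _ _ _ h']
  simp [String.ofList]

theorem stepA_none (st : List String × Option String) (line : String)
    (h : pvParse line = none) : pvStepA st line = st := by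
  by_cases hc : PySem.Str.isIn ":" line = true
  · rw [pvStepA, if_pos hc]
    rw [pvParse] at h
    rcases hs : (PySem.Str.splitMax? line ":" 3).getD [] with _ | ⟨p0, _ | ⟨p1, _ | ⟨p2, rest⟩⟩⟩ <;>
      simp_all
  · rw [pvStepA, if_neg (by simp_all)]

theorem stepA_some (st : List String × Option String) (line : String)
    (r : String × String × String × String) (h : pvParse line = some r) :
    pvStepA st line =
      ((if some r.1 ≠ st.2 then st.1 ++ ["\n=== " ++ r.1 ++ " ==="] else st.1) ++ [pvFmt r],
       if some r.1 ≠ st.2 then some r.1 else st.2) := by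
  have hin : PySem.Str.isIn ":" line = true := by
    by_contra hc
    rw [pvParse, parse_none_of_no_colon line (by simp_all)] at h
    simp at h
  rw [pvStepA, if_pos hin]
  rw [pvParse] at h
  rcases hs : (PySem.Str.splitMax? line ":" 3).getD [] with _ | ⟨p0, _ | ⟨p1, _ | ⟨p2, rest⟩⟩⟩ <;>
    rw [hs] at h <;> simp only [reduceCtorEq] at h
  · cases h
    by_cases hc : some p0 ≠ st.2 <;> simp [hc, pvFmt]

theorem foldl_stepA (ls : List String) : ∀ (acc : List String) (cur : Option String),
    ls.foldl pvStepA (acc, cur) =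
      (acc ++ renderA cur (ls.filterMap pvParse),
       (ls.filterMap pvParse).foldl (fun _ r => some r.1) cur) := by
  induction ls with
  | nil => intro acc cur; simp [renderA]
  | cons line rest ih =>
    intro acc cur
    rw [List.foldl_cons]
    cases hp : pvParse line with
    | none => rw [List.filterMap_cons_none hp, stepA_none _ _ hp]; exact ih acc cur
    | some r =>
      rw [List.filterMap_cons_some hp, stepA_some _ _ _ hp]
      by_cases hc : some r.1 = cur
      · rw [if_neg (by simp [hc]), if_neg (by simp [hc]), ih]
        simp [renderA, hc]
      · rw [if_pos (by simpa using hc), if_pos (by simpa using hc), ih]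
        simp [renderA, Ne.symm, hc]

theorem head?_dropWhile_false {α : Type} (p : α → Bool) (l : List α) (x : α)
    (hx : x ∈ (l.dropWhile p).head?) : p x = false := by
  induction l with
  | nil => simp [List.dropWhile] at hx
  | cons a as ih =>
    rw [List.dropWhile_cons] at hx
    split at hx
    · exact ih hx
    · simp_all

theorem renderA_run (same : List (String × String × String × String)) (ref : String)
    (rest : List (String × String × String × String))
    (h : ∀ x ∈ same, x.1 = ref) :
    renderA (some ref) (same ++ rest) = same.map pvFmt ++ renderA (some ref) rest := by
  induction same with
  | nil => simp
  | cons x xs ih =>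
    have hx : x.1 = ref := h x (List.mem_cons_self)
    simp only [List.cons_append, renderA, hx, ne_eq, not_true_eq_false, List.map_cons]
    rw [if_neg (by simp)]
    simp only [List.nil_append, List.cons.injEq, true_and]
    exact ih (fun y hy => h y (List.mem_cons_of_mem x hy))

theorem renderA_eq_groups (recs : List (String × String × String × String)) (cur : Option String)
    (h : ∀ r ∈ recs.head?, some r.1 ≠ cur) :
    renderA cur recs = pvGroups recs := by
  match recs with
  | [] => simp [renderA, pvGroups]
  | r :: rs =>
    have hr : some r.1 ≠ cur := h r (by simp)
    rw [pvGroups]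
    conv_lhs => rw [renderA, if_pos hr,
      ← List.takeWhile_append_dropWhile (p := fun x => x.1 == r.1) (l := rs)]
    rw [renderA_run _ r.1 _ (fun x hx => by simpa using List.mem_takeWhile_imp hx)]
    rw [renderA_eq_groups (rs.dropWhile (fun x => x.1 == r.1)) (some r.1)
      (fun x hx => by simpa using head?_dropWhile_false _ _ _ hx)]
    simp
termination_by recs.length
decreasing_by exact Nat.lt_succ_of_le (List.length_dropWhile_le _ _)

-- ===== VERDICT (by name: the statement is the Claim_ definition above) =====
theorem format_grep_results_py_spec : Claim_equal_format_grep_results_py := by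
  intro lines pattern _
  unfold Spec_format_grep_results_py format_grep_results_py format_grep_results_py_alt
  rw [foldl_stepA]
  simp
  rw [renderA_eq_groups]
  intro r hr
  simp
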